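-- pv_equiv track=rewrite | github.com/aneeshahehe/practice | cognizant2025_6.py | formalNumber
-- ===== SOURCE A (Python) =====
-- def formalNumber(input1, input2):
--     i=0
--     j=input1-1
--     count=0
--     found = False
--     # to change only the first I to F
--     while i<input1:
--         if input2[i]=='I':
--             if found:
--                 break
--             else:
--                 found = True
--         i=i+1
--
--     while j>=i:
--         if input2[j]=='I':
--             break
--         j=j-1
--
--     if found:
--         count = j-i+1
--     else:
--         count = 0
--
--     return count
-- ===== SOURCE B (Python) =====
-- def formalNumber(input1, input2):
--     positions = [k for k in range(input1) if input2[k] == 'I']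
--     if len(positions) >= 2:
--         return positions[-1] - positions[1] + 1
--     return 0
-- ===== Notes on version B (the rewrite author's own statement) =====
-- stated objective: simpler
-- what changed: Replaces A's two directional break-loops (forward scan for the second 'I', backward scan for the last 'I') with one forward pass that collects all 'I' positions and then uses index arithmetic positions[-1]-positions[1]+1.
import Mathlib
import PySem

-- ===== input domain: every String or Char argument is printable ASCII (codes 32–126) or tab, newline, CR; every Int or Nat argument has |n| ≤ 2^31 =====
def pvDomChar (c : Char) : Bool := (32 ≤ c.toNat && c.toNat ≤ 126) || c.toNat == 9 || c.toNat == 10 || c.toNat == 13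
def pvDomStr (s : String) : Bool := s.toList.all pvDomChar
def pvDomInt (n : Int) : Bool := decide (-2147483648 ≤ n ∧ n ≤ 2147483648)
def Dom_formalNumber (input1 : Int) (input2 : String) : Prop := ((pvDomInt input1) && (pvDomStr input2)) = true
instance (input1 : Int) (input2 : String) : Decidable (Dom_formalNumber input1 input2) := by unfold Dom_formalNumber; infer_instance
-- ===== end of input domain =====

-- B replaces A's forward+backward break-loops with one forward pass collecting all 'I'
-- positions and index arithmetic (objective: simpler).


-- ===== PORT A =====
-- first while loop of A: advance i until the second 'I' (or i = input1); an out-of-range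
-- read is a Python IndexError (excluded by Pre_), the port then just stops.
def pvFwdA (input1 : Int) (s : String) (i : Int) (found : Bool) : Int × Bool :=
  if _h : i < input1 then
    match PySem.Str.pyGet? s i with
    | none => (i, found)            -- Python raises IndexError here; outside Pre_
    | some c =>
      if c = 'I' then
        if found then (i, found)
        else pvFwdA input1 s (i + 1) true
      else pvFwdA input1 s (i + 1) found
  else (i, found)
termination_by (input1 - i).toNat
decreasing_by all_goals omega

-- second while loop of A: move j down to i until an 'I' is read
def pvBwdA (s : String) (i j : Int) : Int :=
  if _h : j ≥ i then
    match PySem.Str.pyGet? s j with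
    | none => j                      -- Python raises IndexError here; outside Pre_
    | some c => if c = 'I' then j else pvBwdA s i (j - 1)
  else j
termination_by (j - i + 1).toNat
decreasing_by all_goals omega

def formalNumber (input1 : Int) (input2 : String) : Int :=
  let r := pvFwdA input1 input2 0 false
  let i := r.1
  let found := r.2
  let j := pvBwdA input2 i (input1 - 1)
  if found then j - i + 1 else 0

-- ===== PORT B =====
def formalNumber_alt (input1 : Int) (input2 : String) : Int :=
  let positions := (PySem.List.pyRange 0 input1 1).filter
      (fun k => PySem.Str.pyGet? input2 k == some 'I')
  if 2 ≤ positions.length then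
    match PySem.List.pyGet? positions (-1), PySem.List.pyGet? positions 1 with
    | some last, some second => last - second + 1
    | _, _ => 0                      -- unreachable when positions.length ≥ 2
  else 0

-- ===== PRECONDITION & SPEC =====
-- Pre_ excludes exactly the inputs on which A raises IndexError (input1 beyond the string's
-- length); B raises there too.
def Pre_formalNumber (input1 : Int) (input2 : String) : Prop :=
  input1 ≤ PySem.Str.len input2
instance (input1 : Int) (input2 : String) : Decidable (Pre_formalNumber input1 input2) := by
  unfold Pre_formalNumber; infer_instance

def pvWitness_formalNumber : Int × String := (5, "xIIxI")

def Spec_formalNumber (input1 : Int) (input2 : String) (out : Int) : Prop := out = formalNumber_alt input1 input2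
instance (input1 : Int) (input2 : String) (out : Int) : Decidable (Spec_formalNumber input1 input2 out) := by unfold Spec_formalNumber; infer_instance

-- ===== CLAIM (what is proved, stated in full; the proofs are below) =====
def Claim_equal_formalNumber : Prop := ∀ (input1 : Int) (input2 : String), Dom_formalNumber input1 input2 → Pre_formalNumber input1 input2 → Spec_formalNumber input1 input2 (formalNumber input1 input2)

-- ===== LEMMAS AND PROOFS =====

-- the list of 'I' positions in [i, input1), as B builds it from i = 0
def pvPos (input1 : Int) (s : String) (i : Int) : List Int :=
  (PySem.List.pyRange i input1 1).filter (fun k => PySem.Str.pyGet? s k == some 'I')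

theorem pvPos_eq_nil (input1 : Int) (s : String) (i : Int) (h : input1 ≤ i) :
    pvPos input1 s i = [] := by
  unfold pvPos
  rw [PySem.List.pyRange_one_eq_nil h]
  rfl

theorem pvPos_cons (input1 : Int) (s : String) (i : Int) (h : i < input1) :
    pvPos input1 s i =
      (if PySem.Str.pyGet? s i = some 'I' then [i] else []) ++ pvPos input1 s (i + 1) := by
  unfold pvPos
  rw [PySem.List.pyRange_one_cons h, List.filter_cons]
  split_ifs with h1 h2 h3 <;> simp_all

theorem pvPos_mem (input1 : Int) (s : String) (i k : Int) (h : k ∈ pvPos input1 s i) :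
    i ≤ k ∧ k < input1 ∧ PySem.Str.pyGet? s k = some 'I' := by
  unfold pvPos at h
  rw [List.mem_filter] at h
  rcases h with ⟨hr, hf⟩
  rw [PySem.List.mem_pyRange_one] at hr
  simpa [hr] using hf

theorem pvGet_some (s : String) (i : Int) (h0 : 0 ≤ i) (hl : i < PySem.Str.len s) :
    ∃ c, PySem.Str.pyGet? s i = some c := by
  rcases e : PySem.Str.pyGet? s i with _ | c
  · rw [PySem.Str.pyGet?_eq, PySem.Chars.pyGet?_eq_listPyGet?,
        PySem.List.pyGet?_eq_none_iff] at e
    exfalso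
    apply e
    unfold PySem.Raise.InRange
    rw [PySem.Str.len_eq] at hl
    omega
  · exact ⟨c, rfl⟩

theorem pvFwd_true (input1 : Int) (s : String) (i : Int) (hi : 0 ≤ i)
    (hlen : input1 ≤ PySem.Str.len s) :
    pvFwdA input1 s i true =
      (match pvPos input1 s i with
       | [] => (max i input1, true)
       | k :: _ => (k, true)) := by
  by_cases h : i < input1
  · obtain ⟨c, e⟩ := pvGet_some s i hi (by omega)
    rw [pvFwdA, dif_pos h, e, pvPos_cons input1 s i h, e]
    dsimp only
    by_cases hc : c = 'I'
    · simp [hc]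
    · rw [if_neg hc, if_neg (by simp [hc]), List.nil_append]
      rw [pvFwd_true input1 s (i + 1) (by omega) hlen]
      rcases pvPos input1 s (i + 1) with _ | ⟨k, rest⟩ <;> simp <;> omega
  · rw [pvFwdA, dif_neg h, pvPos_eq_nil input1 s i (by omega)]
    simp
    omega
termination_by (input1 - i).toNat
decreasing_by omega

theorem pvFwd_false (input1 : Int) (s : String) (i : Int) (hi : 0 ≤ i)
    (hlen : input1 ≤ PySem.Str.len s) :
    pvFwdA input1 s i false =
      (match pvPos input1 s i with
       | [] => (max i input1, false)
       | [_] => (max i input1, true)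
       | _ :: k :: _ => (k, true)) := by
  by_cases h : i < input1
  · obtain ⟨c, e⟩ := pvGet_some s i hi (by omega)
    rw [pvFwdA, dif_pos h, e, pvPos_cons input1 s i h, e]
    dsimp only
    by_cases hc : c = 'I'
    · rw [if_pos hc, if_neg (show ¬(false = true) by simp)]
      rw [if_pos (show some c = some 'I' from by rw [hc])]
      rw [List.cons_append, List.nil_append]
      rw [pvFwd_true input1 s (i + 1) (by omega) hlen]
      rcases pvPos input1 s (i + 1) with _ | ⟨k, rest⟩ <;> simp <;> omega
    · rw [if_neg hc, if_neg (by simp [hc]), List.nil_append]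
      rw [pvFwd_false input1 s (i + 1) (by omega) hlen]
      rcases pvPos input1 s (i + 1) with _ | ⟨k, _ | ⟨m, rest⟩⟩ <;> simp <;> omega
  · rw [pvFwdA, dif_neg h, pvPos_eq_nil input1 s i (by omega)]
    simp
    omega
termination_by (input1 - i).toNat
decreasing_by omega

-- A's backward loop returns the last 'I' position in [i, j], or i - 1 if there is none
theorem pvBwd_spec (s : String) (i j : Int) (hi : 0 ≤ i) (hj : i - 1 ≤ j)
    (hlen : j < PySem.Str.len s) :
    pvBwdA s i j =
      (((PySem.List.pyRange i (j + 1) 1).filter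
          (fun k => PySem.Str.pyGet? s k == some 'I')).getLast?).getD (i - 1) := by
  by_cases h : j ≥ i
  · obtain ⟨c, e⟩ := pvGet_some s j (by omega) hlen
    have e' : PySem.List.pyGet? s.toList j = some c := by
      rw [← PySem.Chars.pyGet?_eq_listPyGet?, ← PySem.Str.pyGet?_eq]; exact e
    rw [pvBwdA, dif_pos h, e]
    dsimp only
    rw [PySem.List.pyRange_one_succ_right (by omega), List.filter_append]
    by_cases hc : c = 'I'
    · rw [if_pos hc]
      simp [e', hc]
    · rw [if_neg hc]
      have hnil : List.filter (fun k => PySem.Str.pyGet? s k == some 'I') [j] = [] := by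
        simp [e', hc]
      rw [hnil, List.append_nil]
      rw [pvBwd_spec s i (j - 1) hi (by omega) (by omega)]
      rw [show j - 1 + 1 = j from by omega]
  · rw [pvBwdA, dif_neg h]
    rw [PySem.List.pyRange_one_eq_nil (by omega)]
    have : j = i - 1 := by omega
    simp [this]
termination_by (j - i + 1).toNat
decreasing_by omega

-- if k heads the position list started from i, it also heads the one started from k itself
theorem pvPos_head_self (input1 : Int) (s : String) (i k : Int) (rest : List Int)
    (h : pvPos input1 s i = k :: rest) : pvPos input1 s k = k :: rest := by
  by_cases hlt : i < input1
  · rw [pvPos_cons input1 s i hlt] at h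
    by_cases hf : PySem.Str.pyGet? s i = some 'I'
    · rw [if_pos hf, List.cons_append, List.nil_append] at h
      injection h with h1 h2
      subst h1
      rw [pvPos_cons input1 s i hlt, if_pos hf, h2]
      rfl
    · rw [if_neg hf, List.nil_append] at h
      exact pvPos_head_self input1 s (i + 1) k rest h
  · rw [pvPos_eq_nil input1 s i (by omega)] at h
    exact absurd h (by simp)
termination_by (input1 - i).toNat
decreasing_by omega

theorem pvPos_tail (input1 : Int) (s : String) (i k : Int) (rest : List Int)
    (h : pvPos input1 s i = k :: rest) : pvPos input1 s (k + 1) = rest := by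
  have h2 := pvPos_head_self input1 s i k rest h
  have hm := pvPos_mem input1 s k k (by rw [h2]; simp)
  have h3 := pvPos_cons input1 s k hm.2.1
  rw [h2, if_pos hm.2.2] at h3
  simp only [List.cons_append, List.nil_append, List.cons.injEq, true_and] at h3
  exact h3.symm

-- ===== VERDICT (by name: the statement is the Claim_ definition above) =====
theorem formalNumber_spec : Claim_equal_formalNumber := by
  intro input1 input2 _hdom hpre
  unfold Pre_formalNumber at hpre
  show (if (pvFwdA input1 input2 0 false).2 then
          pvBwdA input2 (pvFwdA input1 input2 0 false).1 (input1 - 1)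
            - (pvFwdA input1 input2 0 false).1 + 1
        else 0)
     = (if 2 ≤ (pvPos input1 input2 0).length then
          match PySem.List.pyGet? (pvPos input1 input2 0) (-1),
                PySem.List.pyGet? (pvPos input1 input2 0) 1 with
          | some last, some second => last - second + 1
          | _, _ => 0
        else 0)
  by_cases hn : input1 ≤ 0
  · rw [pvFwdA, dif_neg (by omega), pvPos_eq_nil input1 input2 0 hn]
    simp
  · replace hn : 0 < input1 := by omega
    rw [pvFwd_false input1 input2 0 le_rfl hpre]
    rcases e : pvPos input1 input2 0 with _ | ⟨a, _ | ⟨b, rest⟩⟩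
    · -- no 'I' at all: found = false, both sides 0
      simp
    · -- exactly one 'I': i = input1, backward loop starts below it, count = 0
      dsimp only
      rw [max_eq_right hn.le, pvBwdA, dif_neg (by omega)]
      norm_num
    · -- at least two 'I': i = b (the second), j = the last position
      dsimp only
      have hb := pvPos_mem input1 input2 0 b (by rw [e]; simp)
      have htail := pvPos_tail input1 input2 0 a (b :: rest) e
      have hbb := pvPos_head_self input1 input2 (a + 1) b rest htail
      rw [pvBwd_spec input2 b (input1 - 1) hb.1 (by omega)
            (by rw [PySem.Str.len_eq] at hpre ⊢; omega)]
      rw [show input1 - 1 + 1 = input1 from by omega]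
      have hbb' : (PySem.List.pyRange b input1 1).filter
          (fun k => PySem.Str.pyGet? input2 k == some 'I') = b :: rest := hbb
      rw [hbb', if_pos rfl, if_pos (by simp)]
      rw [PySem.List.pyGet?_neg_one, List.getLast?_cons_cons]
      rcases hv : (b :: rest).getLast? with _ | v
      · simp at hv
      · have h1 : PySem.List.pyGet? (a :: b :: rest) 1 = some b := by
          have h10 : ((1 : Nat) : Int) = (1 : Int) := rfl
          rw [← h10, PySem.List.pyGet?_natCast]
          rfl
        rw [h1]
        simp
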